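-- pv_equiv track=rewrite | github.com/LarcesUece/MalMemSO-2024 | src/utils/client.py | validate_endpoint
-- ===== SOURCE A (Python) =====
-- def validate_endpoint(endpoint: str) -> str:
--     """Validates and formats a endpoint.
--
--     Checks if the endpoint is empty and a string and formats it by
--     removing any trailing slashes.
--
--     Args:
--         endpoint (str): The endpoint to validate and format.
--
--     Returns:
--         str: The formatted endpoint.
--
--     Raises:
--         ValueError: If the endpoint is empty.
--         TypeError: If the endpoint is not a string.
--     """
--
--     if not endpoint:
--         raise ValueError("Endpoint cannot be empty.")
--
--     if not isinstance(endpoint, str):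
--         raise TypeError("Endpoint must be a string.")
--
--     splitted_endpoint = endpoint.split("/")
--     formatted_endpoint = "/" + "/".join([part for part in splitted_endpoint if part])
--
--     return formatted_endpoint
-- ===== SOURCE B (Python) =====
-- def validate_endpoint(endpoint: str) -> str:
--     """One-pass re-implementation: scan characters, collapse slash runs."""
--     if not endpoint:
--         raise ValueError("Endpoint cannot be empty.")
--
--     if not isinstance(endpoint, str):
--         raise TypeError("Endpoint must be a string.")
--
--     acc = []
--     pending = False
--     for ch in endpoint:
--         if ch == '/':
--             pending = True
--         else:
--             if pending and acc:
--                 acc.append('/')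
--             acc.append(ch)
--             pending = False
--
--     return '/' + ''.join(acc)
-- ===== Notes on version B (the rewrite author's own statement) =====
-- stated objective: alternative
-- what changed: Replaced split('/')/filter/join over a materialized list of parts by a single character-by-character scan with a pending-slash flag that emits at most one slash per run and skips leading/trailing slashes.
-- outside the precondition, e.g. on validate_endpoint(''): A raises ValueError, B raises ValueError
import Mathlib
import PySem

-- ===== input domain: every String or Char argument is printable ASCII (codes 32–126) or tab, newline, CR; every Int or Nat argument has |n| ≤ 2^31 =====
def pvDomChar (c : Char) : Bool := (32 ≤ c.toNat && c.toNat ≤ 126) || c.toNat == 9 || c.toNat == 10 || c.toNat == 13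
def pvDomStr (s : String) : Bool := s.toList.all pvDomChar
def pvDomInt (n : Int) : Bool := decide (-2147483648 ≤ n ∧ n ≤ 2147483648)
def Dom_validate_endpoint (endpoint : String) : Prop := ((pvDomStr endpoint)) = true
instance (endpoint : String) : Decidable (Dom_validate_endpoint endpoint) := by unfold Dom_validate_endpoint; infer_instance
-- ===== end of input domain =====

-- B replaces split/filter/join by a one-pass scan with a pending-slash flag (objective: alternative decomposition, same cost).

-- ===== PORT A =====
-- 'if not endpoint: raise ValueError' is excluded by Pre_; the isinstance guard never fires for a String argument.
def validate_endpoint (endpoint : String) : String :=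
  let splitted_endpoint := PySem.Chars.splitOn endpoint.toList ['/']
  String.ofList ('/' :: PySem.Chars.join ['/'] (splitted_endpoint.filter (fun part => part ≠ ([] : List Char))))

-- ===== PORT B =====
-- loop body of Source B: on '/', set pending; else append (an interior '/' first, when pending and acc nonempty)
def veStep (st : List Char × Bool) (ch : Char) : List Char × Bool :=
  if ch = '/' then (st.1, true)
  else ((if st.2 ∧ st.1 ≠ [] then st.1 ++ ['/'] else st.1) ++ [ch], false)

def validate_endpoint_alt (endpoint : String) : String :=
  String.ofList ('/' :: (endpoint.toList.foldl veStep ([], false)).1)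

-- ===== PRECONDITION & SPEC =====
-- Pre_ excludes exactly the empty string, on which A raises ValueError (B raises it too).
def Pre_validate_endpoint (endpoint : String) : Prop := endpoint ≠ ""
instance (endpoint : String) : Decidable (Pre_validate_endpoint endpoint) := by unfold Pre_validate_endpoint; infer_instance
def pvWitness_validate_endpoint : String := "api//v1/"

def Spec_validate_endpoint (endpoint : String) (out : String) : Prop := out = validate_endpoint_alt endpoint
instance (endpoint : String) (out : String) : Decidable (Spec_validate_endpoint endpoint out) := by unfold Spec_validate_endpoint; infer_instance

-- ===== CLAIM (what is proved, stated in full; the proofs are below) =====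
def Claim_equal_validate_endpoint : Prop := ∀ (endpoint : String), Dom_validate_endpoint endpoint → Pre_validate_endpoint endpoint → Spec_validate_endpoint endpoint (validate_endpoint endpoint)

-- ===== LEMMAS AND PROOFS =====

-- splitOn by a single '/' as a plain structural recursion
def splitChar : List Char → List (List Char)
  | [] => [[]]
  | c :: r =>
    if c = '/' then [] :: splitChar r
    else match splitChar r with
      | [] => [[c]]
      | h :: t => (c :: h) :: t

lemma splitChar_ne_nil (cs : List Char) : splitChar cs ≠ [] := by
  cases cs with
  | nil => simp [splitChar]
  | cons c r =>
    simp only [splitChar]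
    split_ifs
    · simp
    · cases h : splitChar r <;> simp

lemma splitOn_go_eq (l : List Char) : ∀ (fuel : Nat) (cur : List Char) (acc : List (List Char)),
    l.length ≤ fuel →
    PySem.Chars.splitOn.go ['/'] fuel l cur acc
      = acc.reverse ++ (splitChar l).modifyHead (cur.reverse ++ ·) := by
  induction l with
  | nil =>
    intro fuel cur acc _
    cases fuel <;> simp [PySem.Chars.splitOn.go, splitChar]
  | cons c r ih =>
    intro fuel cur acc hlen
    cases fuel with
    | zero => simp at hlen
    | succ fuel =>
      by_cases hc : c = '/'
      · subst hc
        rw [show PySem.Chars.splitOn.go ['/'] (fuel+1) ('/' :: r) cur acc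
              = PySem.Chars.splitOn.go ['/'] fuel r [] (cur.reverse :: acc) by
            simp [PySem.Chars.splitOn.go, List.isPrefixOf]]
        rw [ih fuel [] (cur.reverse :: acc) (by simpa using Nat.le_of_succ_le_succ hlen)]
        simp only [splitChar, if_true, List.modifyHead_cons, List.reverse_cons, List.append_assoc,
          List.singleton_append]
        cases hs : splitChar r <;> simp
      · rw [show PySem.Chars.splitOn.go ['/'] (fuel+1) (c :: r) cur acc
              = PySem.Chars.splitOn.go ['/'] fuel r (c :: cur) acc by
            simp [PySem.Chars.splitOn.go, List.isPrefixOf, (Ne.symm hc)]]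
        rw [ih fuel (c :: cur) acc (by simpa using Nat.le_of_succ_le_succ hlen)]
        rcases hs : splitChar r with _ | ⟨h, t⟩
        · exact absurd hs (splitChar_ne_nil r)
        · simp [splitChar, hc, hs]

lemma splitOn_eq_splitChar (cs : List Char) :
    PySem.Chars.splitOn cs ['/'] = splitChar cs := by
  have := splitOn_go_eq cs (cs.length + 1) [] [] (Nat.le_succ _)
  rw [PySem.Chars.splitOn, this]
  cases hs : splitChar cs <;> simp

-- every nonempty part preceded by a '/'
def slashParts : List (List Char) → List Char
  | [] => []
  | p :: t => (if p = [] then [] else '/' :: p) ++ slashParts t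

lemma slashParts_nil_iff (ps : List (List Char)) :
    slashParts ps = [] ↔ ps.filter (fun p => p ≠ ([] : List Char)) = [] := by
  induction ps with
  | nil => simp [slashParts]
  | cons p t ih =>
    by_cases hp : p = [] <;> simp [slashParts, hp, ih]

lemma slashParts_head (t : List (List Char)) (x : Char) (xs : List Char)
    (h : slashParts t = x :: xs) : x = '/' := by
  induction t with
  | nil => simp [slashParts] at h
  | cons u us ih =>
    by_cases hu : u = []
    · simp [slashParts, hu] at h; exact ih h
    · simp [slashParts, hu] at h; exact h.1.symm

lemma join_filter_eq_tail (ps : List (List Char)) :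
    PySem.Chars.join ['/'] (ps.filter (fun p => p ≠ ([] : List Char))) = (slashParts ps).tail := by
  induction ps with
  | nil => simp [slashParts, PySem.Chars.join, List.intercalate]
  | cons p t ih =>
    by_cases hp : p = []
    · have hfp : (p :: t).filter (fun p => p ≠ ([] : List Char))
          = t.filter (fun p => p ≠ ([] : List Char)) := by simp [hp]
      rw [hfp, ih]
      simp [slashParts, hp]
    · have hfp : (p :: t).filter (fun p => p ≠ ([] : List Char))
          = p :: t.filter (fun p => p ≠ ([] : List Char)) := by simp [hp]
      rw [hfp]
      rcases hf : t.filter (fun p => p ≠ ([] : List Char)) with _ | ⟨q, s⟩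
      · have hsp : slashParts t = [] := (slashParts_nil_iff t).2 hf
        simp [slashParts, hp, hsp, PySem.Chars.join, List.intercalate]
      · rw [hf] at ih
        -- rcases has already rewritten the goal with hf
        have hj : PySem.Chars.join ['/'] (p :: q :: s)
            = p ++ ['/'] ++ PySem.Chars.join ['/'] (q :: s) := by
          simp [PySem.Chars.join, List.intercalate]
        rw [hj, ih]
        rcases hsp : slashParts t with _ | ⟨x, xs⟩
        · exfalso
          have hnil := (slashParts_nil_iff t).1 hsp
          simp at hnil
          have hqmem : q ∈ List.filter (fun p => decide (p ≠ ([] : List Char))) t := by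
            rw [hf]; simp
          have h1 := List.mem_of_mem_filter hqmem
          have h2 := List.of_mem_filter hqmem
          simp at h2
          exact h2 (hnil q h1)
        · obtain rfl : x = '/' := slashParts_head t x xs hsp
          simp [slashParts, hp, hsp]

-- the scan's specification: Fspec = value of acc from a fresh state, Gspec = continuation mid-word
mutual
def Fspec : List Char → List Char
  | [] => []
  | c :: r => if c = '/' then Fspec r else c :: Gspec r
def Gspec : List Char → List Char
  | [] => []
  | c :: r => if c = '/' then (if Fspec r = [] then [] else '/' :: Fspec r) else c :: Gspec r
end

lemma foldl_veStep (cs : List Char) : ∀ (acc : List Char) (pending : Bool),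
    (cs.foldl veStep (acc, pending)).1
      = acc ++ (if acc = [] then Fspec cs
                else if pending then (if Fspec cs = [] then [] else '/' :: Fspec cs)
                else Gspec cs) := by
  induction cs with
  | nil => intro acc pending; cases pending <;> simp [Fspec, Gspec]
  | cons c r ih =>
    intro acc pending
    by_cases hc : c = '/'
    · subst hc
      simp only [List.foldl_cons, veStep, if_true]
      rw [ih acc true]
      by_cases ha : acc = []
      · simp [ha, Fspec]
      · cases pending <;> simp [ha, Fspec, Gspec]
    · simp only [List.foldl_cons, veStep, hc, if_false]
      by_cases ha : acc = []
      · subst ha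
        simp only [ne_eq, not_true_eq_false, and_false, if_false, List.nil_append]
        rw [ih [c] false]
        simp [Fspec, hc]
      · by_cases hp : pending = true
        · subst hp
          simp only [ha, ne_eq, not_false_eq_true, and_self, if_true]
          rw [ih (acc ++ ['/'] ++ [c]) false]
          simp [ha, Fspec, hc]
        · simp only [Bool.not_eq_true] at hp; subst hp
          simp only [Bool.false_eq_true, false_and, if_false]
          rw [ih (acc ++ [c]) false]
          simp [ha, Gspec, hc]

lemma slashParts_splitChar (cs : List Char) :
    slashParts (splitChar cs) = (if Fspec cs = [] then [] else '/' :: Fspec cs)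
    ∧ ∀ h t, splitChar cs = h :: t → Gspec cs = h ++ slashParts t := by
  induction cs with
  | nil =>
    constructor
    · simp [splitChar, slashParts, Fspec]
    · intro h t he
      simp [splitChar] at he
      rcases he with ⟨rfl, rfl⟩
      simp [Gspec, slashParts]
  | cons c r ih =>
    by_cases hc : c = '/'
    · subst hc
      constructor
      · simp [splitChar, slashParts, Fspec, ih.1]
      · intro h t he
        simp [splitChar] at he
        rw [← he.2, Gspec]
        simp [← he.1, ih.1]
    · rcases hs : splitChar r with _ | ⟨h, t⟩
      · exact absurd hs (splitChar_ne_nil r)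
      · have hsc : splitChar (c :: r) = (c :: h) :: t := by simp [splitChar, hc, hs]
        have hg : Gspec r = h ++ slashParts t := ih.2 h t hs
        constructor
        · rw [hsc]
          simp [slashParts, Fspec, hc, hg]
        · intro h' t' he
          rw [hsc] at he
          simp at he
          rw [← he.2, ← he.1, Gspec]
          simp [hc, hg]

lemma Fspec_eq_join (cs : List Char) :
    Fspec cs = PySem.Chars.join ['/'] ((splitChar cs).filter (fun p => p ≠ ([] : List Char))) := by
  rw [join_filter_eq_tail, (slashParts_splitChar cs).1]
  by_cases h : Fspec cs = [] <;> simp [h]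

-- ===== VERDICT (by name: the statement is the Claim_ definition above) =====
theorem validate_endpoint_spec : Claim_equal_validate_endpoint := by
  intro endpoint _ _
  unfold Spec_validate_endpoint validate_endpoint validate_endpoint_alt
  rw [splitOn_eq_splitChar, foldl_veStep endpoint.toList [] false]
  rw [Fspec_eq_join]
  simp
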